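-- pv_equiv track=rewrite | github.com/falkievich/detecta-personas-pdf | funcs/normalizacion/normalizacion_txt_json.py | has_token_overlap
-- ===== SOURCE A (Python) =====
-- from typing import List, Set
--
-- def has_token_overlap(a_tokens: List[str], b_tokens: List[str]) -> bool:
--     """
--     Verifica si dos listas de tokens tienen al menos 1 token en común
--     o comparten un prefijo de al menos 3 caracteres.
--
--     Args:
--         a_tokens: Primera lista de tokens
--         b_tokens: Segunda lista de tokens
--
--     Returns:
--         True si hay solapamiento, False en caso contrario
--     """
--     set_a = set(a_tokens)
--     set_b = set(b_tokens)
--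
--     # Intersección directa
--     if set_a & set_b:
--         return True
--
--     # Si no hay intersección exacta, probar prefijo >= 3
--     for ta in set_a:
--         for tb in set_b:
--             if len(ta) >= 3 and len(tb) >= 3 and (ta.startswith(tb) or tb.startswith(ta)):
--                 return True
--
--     return False
-- ===== SOURCE B (Python) =====
-- from typing import List
--
-- def has_token_overlap(a_tokens: List[str], b_tokens: List[str]) -> bool:
--     # Exact-token overlap via one hashed membership pass, then prefix overlap
--     # via a precomputed set of all length>=3 prefixes of a's long tokens:
--     # no a-token x b-token pairwise scan.
--     set_a = set(a_tokens)
--     if any(t in set_a for t in b_tokens):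
--         return True
--     a3 = {t for t in a_tokens if len(t) >= 3}
--     prefixes_a = {t[:k] for t in a_tokens if len(t) >= 3 for k in range(3, len(t) + 1)}
--     return any(
--         len(tb) >= 3 and (
--             tb in prefixes_a
--             or any(tb[:k] in a3 for k in range(3, len(tb)))
--         )
--         for tb in b_tokens
--     )
-- ===== Notes on version B (the rewrite author's own statement) =====
-- stated objective: faster
-- what changed: Replaces the quadratic all-pairs startswith scan by a hashed exact-membership pass plus a precomputed set of all len>=3 prefixes of a-tokens, so each b-token is checked against sets instead of every a-token.
import Mathlib
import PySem

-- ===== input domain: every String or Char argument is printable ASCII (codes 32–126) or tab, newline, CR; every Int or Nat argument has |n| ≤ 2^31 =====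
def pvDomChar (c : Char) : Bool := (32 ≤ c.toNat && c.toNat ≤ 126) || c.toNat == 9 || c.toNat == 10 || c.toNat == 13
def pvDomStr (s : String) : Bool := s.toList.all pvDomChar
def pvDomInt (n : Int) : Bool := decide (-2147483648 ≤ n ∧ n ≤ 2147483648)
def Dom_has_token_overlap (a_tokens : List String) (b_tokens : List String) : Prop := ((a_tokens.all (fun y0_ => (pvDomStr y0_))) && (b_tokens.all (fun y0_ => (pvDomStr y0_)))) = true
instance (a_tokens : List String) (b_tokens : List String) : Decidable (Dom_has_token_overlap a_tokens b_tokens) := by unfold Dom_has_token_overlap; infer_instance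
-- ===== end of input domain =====

-- B replaces A's all-pairs startswith scan by hashed exact-token membership plus a precomputed set of len>=3 prefixes of a-tokens (objective: faster).


-- ===== PORT A =====
def has_token_overlap (a_tokens : List String) (b_tokens : List String) : Bool :=
  let set_a : PySem.Set String := PySem.Set.ofList a_tokens
  let set_b : PySem.Set String := PySem.Set.ofList b_tokens
  if !(PySem.Set.inter set_a set_b).isEmpty then true
  else
    set_a.any (fun ta => set_b.any (fun tb =>
      decide (3 ≤ PySem.Str.len ta) && decide (3 ≤ PySem.Str.len tb) &&
      (PySem.Str.startswith ta tb || PySem.Str.startswith tb ta)))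

-- ===== PORT B =====
def has_token_overlap_alt (a_tokens : List String) (b_tokens : List String) : Bool :=
  let set_a : PySem.Set String := PySem.Set.ofList a_tokens
  if b_tokens.any (fun t => PySem.Set.contains set_a t) then true
  else
    let a3 : PySem.Set String := PySem.Set.ofList (a_tokens.filter (fun t => decide (3 ≤ PySem.Str.len t)))
    let prefixes_a : PySem.Set String := PySem.Set.ofList
      ((a_tokens.filter (fun t => decide (3 ≤ PySem.Str.len t))).flatMap
        (fun t => (PySem.List.pyRange 3 ((PySem.Str.len t : Int) + 1) 1).map
          (fun k => PySem.Str.slice t none (some k))))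
    b_tokens.any (fun tb =>
      decide (3 ≤ PySem.Str.len tb) &&
      (PySem.Set.contains prefixes_a tb ||
        (PySem.List.pyRange 3 ((PySem.Str.len tb : Int)) 1).any
          (fun k => PySem.Set.contains a3 (PySem.Str.slice tb none (some k)))))

-- ===== PRECONDITION & SPEC =====
def Spec_has_token_overlap (a_tokens : List String) (b_tokens : List String) (out : Bool) : Prop := out = has_token_overlap_alt a_tokens b_tokens
instance (a_tokens : List String) (b_tokens : List String) (out : Bool) : Decidable (Spec_has_token_overlap a_tokens b_tokens out) := by unfold Spec_has_token_overlap; infer_instance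

-- ===== CLAIM (what is proved, stated in full; the proofs are below) =====
def Claim_equal_has_token_overlap : Prop := ∀ (a_tokens : List String) (b_tokens : List String), Dom_has_token_overlap a_tokens b_tokens → Spec_has_token_overlap a_tokens b_tokens (has_token_overlap a_tokens b_tokens)

-- ===== LEMMAS AND PROOFS =====

-- the common semantics of both programs: an exact shared token, or a >=3-char whole-token prefix relation
def OverlapProp (a_tokens : List String) (b_tokens : List String) : Prop :=
  (∃ t, t ∈ a_tokens ∧ t ∈ b_tokens) ∨
  (∃ ta ∈ a_tokens, ∃ tb ∈ b_tokens, 3 ≤ ta.toList.length ∧ 3 ≤ tb.toList.length ∧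
    (tb.toList <+: ta.toList ∨ ta.toList <+: tb.toList))

theorem slice_toList_of_nonneg (t : String) (k : Int) (hk : 0 ≤ k) :
    (PySem.Str.slice t none (some k)).toList = t.toList.take k.toNat := by
  have h : k = ((k.toNat : Nat) : Int) := (Int.toNat_of_nonneg hk).symm
  rw [h]
  rw [PySem.Str.toList_slice, PySem.Chars.slice_eq_listSlice, PySem.List.slice_to_natCast, Int.toNat_natCast]

theorem hasA_iff (a b : List String) :
    has_token_overlap a b = true ↔ OverlapProp a b := by
  unfold has_token_overlap OverlapProp
  by_cases h : (PySem.Set.inter (PySem.Set.ofList a) (PySem.Set.ofList b)).isEmpty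
  · simp only [h, Bool.not_true, if_neg, Bool.false_eq_true, not_false_iff]
    rw [List.isEmpty_iff] at h
    have hno : ¬ ∃ t, t ∈ a ∧ t ∈ b := by
      rintro ⟨t, ht1, ht2⟩
      have : t ∈ PySem.Set.inter (PySem.Set.ofList a) (PySem.Set.ofList b) :=
        (PySem.Set.mem_inter _ _ t).2 ⟨(PySem.Set.mem_ofList a t).2 ht1, (PySem.Set.mem_ofList b t).2 ht2⟩
      simp [h] at this
    simp only [List.any_eq_true, PySem.Set.mem_ofList, Bool.and_eq_true, Bool.or_eq_true,
      decide_eq_true_eq, PySem.Str.startswith_eq, PySem.Chars.startswith_iff, PySem.Str.len_eq,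
      Nat.ofNat_le_cast]
    constructor
    · rintro ⟨ta, hta, tb, htb, ⟨h1, h2⟩, h3⟩
      exact Or.inr ⟨ta, hta, tb, htb, h1, h2, h3⟩
    · rintro (habs | ⟨ta, hta, tb, htb, h1, h2, h3⟩)
      · exact absurd habs hno
      · exact ⟨ta, hta, tb, htb, ⟨h1, h2⟩, h3⟩
  · simp only [Bool.not_eq_true] at h
    rw [List.isEmpty_eq_false_iff_exists_mem] at h
    obtain ⟨t, ht⟩ := h
    have := (PySem.Set.mem_inter _ _ t).1 ht
    simp only [PySem.Set.mem_ofList] at this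
    have hcond : ((PySem.Set.inter (PySem.Set.ofList a) (PySem.Set.ofList b)).isEmpty) = false := by
      rw [List.isEmpty_eq_false_iff_exists_mem]; exact ⟨t, ht⟩
    simp only [hcond, Bool.not_false, if_true, true_iff]
    exact Or.inl ⟨t, this⟩

theorem hasB_iff (a b : List String) :
    has_token_overlap_alt a b = true ↔ OverlapProp a b := by
  unfold has_token_overlap_alt OverlapProp
  by_cases h : b.any (fun t => PySem.Set.contains (PySem.Set.ofList a) t)
  · -- exact common token
    obtain ⟨t, ht, hc⟩ := List.any_eq_true.1 h
    rw [PySem.Set.contains_iff, PySem.Set.mem_ofList] at hc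
    simp only [h, if_true, true_iff]
    exact Or.inl ⟨t, hc, ht⟩
  · have hno : ¬ ∃ t, t ∈ a ∧ t ∈ b := by
      rintro ⟨t, ht1, ht2⟩
      exact h (List.any_eq_true.2 ⟨t, ht2,
        (PySem.Set.contains_iff _ _).2 ((PySem.Set.mem_ofList a t).2 ht1)⟩)
    simp only [Bool.not_eq_true] at h
    simp only [h, Bool.false_eq_true, if_false]
    simp only [List.any_eq_true, Bool.and_eq_true, Bool.or_eq_true, decide_eq_true_eq,
      PySem.Set.contains_iff, PySem.Set.mem_ofList, List.mem_flatMap, List.mem_map,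
      List.mem_filter, PySem.List.mem_pyRange_one, PySem.Str.len_eq, Nat.ofNat_le_cast]
    constructor
    · rintro ⟨tb, htb, hlb, (⟨ta, ⟨hta, hla⟩, k, ⟨hk3, hklt⟩, heq⟩ | ⟨k, ⟨hk3, hklt⟩, hmem, hlslice⟩)⟩
      · -- tb is a k-prefix of ta
        have hk0 : (0:Int) ≤ k := by omega
        have htbl : tb.toList = ta.toList.take k.toNat := by
          rw [← heq]; exact slice_toList_of_nonneg ta k hk0
        refine Or.inr ⟨ta, hta, tb, htb, hla, hlb, Or.inl ?_⟩
        rw [htbl]; exact List.take_prefix _ _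
      · -- some k-prefix of tb is in a3
        have hk0 : (0:Int) ≤ k := by omega
        have := slice_toList_of_nonneg tb k hk0
        refine Or.inr ⟨_, hmem, tb, htb, hlslice, hlb, Or.inr ?_⟩
        rw [this]; exact List.take_prefix _ _
    · rintro (habs | ⟨ta, hta, tb, htb, hla, hlb, hrel⟩)
      · exact absurd habs hno
      refine ⟨tb, htb, hlb, ?_⟩
      rcases hrel with hpre | hpre
      · -- tb prefix of ta : tb ∈ prefixes_a
        left
        refine ⟨ta, ⟨hta, hla⟩, (tb.toList.length : Int), ⟨by exact_mod_cast hlb, ?_⟩, ?_⟩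
        · have := hpre.length_le; omega
        · have : tb.toList = ta.toList.take tb.toList.length := by
            exact List.prefix_iff_eq_take.1 hpre
          apply String.toList_inj.1
          rw [slice_toList_of_nonneg ta _ (by positivity), Int.toNat_natCast]
          exact this.symm
      · -- ta prefix of tb : a k-prefix of tb in a3, or ta = tb (excluded by hno)
        by_cases hlen : ta.toList.length = tb.toList.length
        · have heq : ta = tb := String.toList_inj.1 (hpre.eq_of_length hlen)
          exact absurd ⟨ta, hta, by rw [heq]; exact htb⟩ hno
        · right
          have hlt : ta.toList.length < tb.toList.length :=
            lt_of_le_of_ne hpre.length_le hlen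
          refine ⟨(ta.toList.length : Int), ⟨by exact_mod_cast hla, by exact_mod_cast hlt⟩, ?_, ?_⟩
          · have hta' : ta.toList = tb.toList.take ta.toList.length :=
              List.prefix_iff_eq_take.1 hpre
            have : PySem.Str.slice tb none (some (ta.toList.length : Int)) = ta := by
              apply String.toList_inj.1
              rw [slice_toList_of_nonneg tb _ (by positivity), Int.toNat_natCast]
              exact hta'.symm
            rw [this]; exact hta
          · rw [slice_toList_of_nonneg tb _ (by positivity), Int.toNat_natCast,
              List.length_take]
            omega

-- ===== VERDICT (by name: the statement is the Claim_ definition above) =====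
theorem has_token_overlap_spec : Claim_equal_has_token_overlap := by
  intro a b _
  show _ = _
  rw [Bool.eq_iff_iff, hasA_iff, hasB_iff]
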